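-- pv_equiv track=rewrite | github.com/halqin/py_practise | baseball.py | inning
-- ===== SOURCE A (Python) =====
-- def hit2(base, occupied= None):
-- 	if occupied == None:
-- 		occupied = []
--
-- 	new_occu = [pre_occu + base for pre_occu in occupied]
--
-- 	if base:
-- 		new_occu.append(base)
--
-- 	score = len([base for base in new_occu if base >=4])
--
-- 	final_occu = sorted([base for base in new_occu if base <4])
--
-- 	return score, final_occu
--
-- def inning(seq):
--
-- 	'''
-- 	>>> inning([0, 1, 2, 3, 4])
-- 	(4, [])
-- 	>>> inning((4, 3, 2, 1, 0))
-- 	(2, [1, 3])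
-- 	>>> inning([1, 1, 2, 1, 0, 0, 1, 3, 0])
-- 	(5, [3])
-- 	'''
-- 	total_score = 0
-- 	corrdi_ = []
-- 	for num_hit in seq:
-- 		hit_tuple = hit2(num_hit, corrdi_)
-- 		score = hit_tuple[0]
-- 		corrdi_ = hit_tuple[1]
-- 		total_score += score
-- 	result_list = [total_score, corrdi_]
--
-- 	return tuple(result_list)
-- ===== SOURCE B (Python) =====
-- def inning(seq):
--     # Suffix-sum scan from the right: a runner created by hit h at index i ends at the
--     # suffix sum s_i, and scores iff some later suffix sum drops to s_i - 4 or below.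
--     s = 0          # suffix sum of the elements processed so far (seq[i:])
--     m = 0          # minimum suffix sum seen so far (including the empty suffix, 0)
--     score = 0
--     rem = []
--     for h in reversed(seq):
--         s += h
--         if h:
--             if m <= s - 4:
--                 score += 1
--             else:
--                 rem.append(s)
--         m = min(m, s)
--     return (score, sorted(rem))
-- ===== Notes on version B (the rewrite author's own statement) =====
-- stated objective: faster
-- what changed: Replaces the per-hit simulation (shift every occupied base, filter, and re-sort the whole list at each step) by a single right-to-left pass over suffix sums with a running minimum, deciding each runner's fate in O(1) and sorting the survivors once.
import Mathlib
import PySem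

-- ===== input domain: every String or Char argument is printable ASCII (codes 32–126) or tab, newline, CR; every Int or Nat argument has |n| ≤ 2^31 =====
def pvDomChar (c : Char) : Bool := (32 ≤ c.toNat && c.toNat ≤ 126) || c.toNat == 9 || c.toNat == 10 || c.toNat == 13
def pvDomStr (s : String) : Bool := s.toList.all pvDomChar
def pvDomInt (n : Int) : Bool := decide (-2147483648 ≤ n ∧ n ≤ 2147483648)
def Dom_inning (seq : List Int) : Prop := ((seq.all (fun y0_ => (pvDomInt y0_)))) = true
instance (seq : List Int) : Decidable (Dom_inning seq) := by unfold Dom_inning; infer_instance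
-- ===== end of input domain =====

-- B replaces A's per-hit list simulation by one right-to-left suffix-sum scan with a
-- running minimum (O(1) per hit) and a single final sort.

-- ===== PORT A =====
def hit2 (base : Int) (occupied : List Int) : Int × List Int :=
  let newOccu := occupied.map (fun preOccu => preOccu + base) ++ (if base ≠ 0 then [base] else [])
  let score : Int := ((newOccu.filter (fun b => decide (4 ≤ b))).length : Int)
  let finalOccu := PySem.List.sorted (newOccu.filter (fun b => decide (b < 4))) (fun x => x) false
  (score, finalOccu)

def inningStep (st : Int × List Int) (numHit : Int) : Int × List Int :=
  let hitTuple := hit2 numHit st.2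
  (st.1 + hitTuple.1, hitTuple.2)

def inning (seq : List Int) : Int × List Int :=
  let r := seq.foldl inningStep (0, ([] : List Int))
  (r.1, r.2)

-- ===== PORT B =====
def altStep (st : Int × Int × Int × List Int) (h : Int) : Int × Int × Int × List Int :=
  let s := st.1 + h
  let m := st.2.1
  let p :=
    if h ≠ 0 then
      (if m ≤ s - 4 then (st.2.2.1 + 1, st.2.2.2) else (st.2.2.1, st.2.2.2 ++ [s]))
    else (st.2.2.1, st.2.2.2)
  (s, min m s, p.1, p.2)

def inning_alt (seq : List Int) : Int × List Int :=
  let st := seq.reverse.foldl altStep (0, 0, 0, ([] : List Int))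
  (st.2.2.1, PySem.List.sorted st.2.2.2 (fun x => x) false)

-- ===== PRECONDITION & SPEC =====
def Spec_inning (seq : List Int) (out : Int × List Int) : Prop := out = inning_alt seq
instance (seq : List Int) (out : Int × List Int) : Decidable (Spec_inning seq out) := by unfold Spec_inning; infer_instance

-- ===== CLAIM (what is proved, stated in full; the proofs are below) =====
def Claim_equal_inning : Prop := ∀ (seq : List Int), Dom_inning seq → Spec_inning seq (inning seq)

-- ===== LEMMAS AND PROOFS =====

-- a runner standing at p before the hits `t` eventually reaches ≥ 4 (and scores)
def scoresB (p : Int) : List Int → Bool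
  | [] => false
  | h :: t => decide (4 ≤ p + h) || scoresB (p + h) t

-- minimum over all suffix sums of the list (including the full sum and 0)
def mAll : List Int → Int
  | [] => 0
  | h :: t => min (h + t.sum) (mAll t)

-- total score contributed by runners created during the list
def NS : List Int → Int
  | [] => 0
  | h :: t => ((if h ≠ 0 ∧ 4 ≤ h then 1 else 0) + (if h ≠ 0 ∧ h < 4 ∧ scoresB h t = true then 1 else 0)) + NS t

-- final positions (in creation order) of created runners that never score
def NR : List Int → List Int
  | [] => []
  | h :: t => (if h ≠ 0 ∧ h < 4 ∧ ¬(scoresB h t = true) then [h + t.sum] else []) ++ NR t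

lemma scoresB_char (t : List Int) : ∀ q h : Int, scoresB q (h :: t) = true ↔ mAll t ≤ q + h + t.sum - 4 := by
  induction t with
  | nil => intro q h; simp [scoresB, mAll]
  | cons h' t' ih =>
      intro q h
      have h2 := ih (q + h) h'
      simp only [scoresB, Bool.or_eq_true, decide_eq_true_iff, mAll, List.sum_cons] at h2 ⊢
      cases hsc : scoresB (q + h + h') t' <;> simp [hsc] at h2 ⊢ <;> omega

lemma count_split (l : List Int) (h : Int) (t : List Int) :
    l.countP (fun p => scoresB p (h :: t)) =
      l.countP (fun p => decide (4 ≤ p + h)) + l.countP (fun p => decide (p + h < 4) && scoresB (p + h) t) := by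
  induction l with
  | nil => simp
  | cons a l ih =>
      simp only [List.countP_cons, ih]
      by_cases h4 : (4 : Int) ≤ a + h
      · simp [scoresB, h4, show ¬(a + h < 4) by omega]; omega
      · simp [scoresB, h4, show a + h < 4 by omega]; omega

lemma sorted_id_perm_arg (x y : List Int) (hp : x.Perm y) :
    PySem.List.sorted x (fun v => v) false = PySem.List.sorted y (fun v => v) false := by
  exact PySem.List.sorted_eq_sorted_of_perm x y (fun v => v) (fun a b hab => hab) hp

lemma filter_map_add (occ : List Int) (h : Int) (L : List Int) (q : Int → Bool) :
    ((occ.map (fun p => p + h) ++ L).filter q)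
      = (occ.filter (fun p => q (p + h))).map (fun p => p + h) ++ L.filter q := by
  simp only [List.filter_append, List.filter_map]
  rfl

lemma Aside : ∀ (seq : List Int) (total : Int) (occ : List Int),
    List.foldl inningStep (total, occ) seq =
      (total + ((occ.countP (fun p => scoresB p seq) : Nat) : Int) + NS seq,
       if seq = [] then occ
       else PySem.List.sorted
         ((occ.filter (fun p => !scoresB p seq)).map (fun p => p + seq.sum) ++ NR seq) (fun x => x) false) := by
  intro seq
  induction seq with
  | nil => intro total occ; simp [NS, scoresB]
  | cons h t ih =>
      intro total occ
      have hnot : ∀ p : Int, (decide (p + h < 4)) = !decide (4 ≤ p + h) := by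
        intro p; by_cases hp : 4 ≤ p + h <;> simp [hp] <;> omega
      have step : List.foldl inningStep (total, occ) (h :: t) =
          List.foldl inningStep
            (total + ((((occ.map (fun p => p + h) ++ (if h ≠ 0 then [h] else [])).filter
                (fun b => decide (4 ≤ b))).length : Nat) : Int),
             PySem.List.sorted ((occ.map (fun p => p + h) ++ (if h ≠ 0 then [h] else [])).filter
                (fun b => decide (b < 4))) (fun x => x) false) t := rfl
      rw [step, ih]
      refine Prod.ext ?_ ?_
      · -- score component
        rw [List.Perm.countP_eq _ (PySem.List.sorted_perm _ _ _)]
        rw [filter_map_add, filter_map_add]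
        have hsplit := count_split occ h t
        simp only [List.countP_append, List.countP_filter, List.countP_map, List.length_append,
          List.length_map, List.countP_eq_length_filter.symm, NS]
        have e1 : (fun a => ((fun p => scoresB p t) ∘ fun p => p + h) a && decide (a + h < 4))
            = (fun p => decide (p + h < 4) && scoresB (p + h) t) := by
          funext a; simp [Function.comp, Bool.and_comm]
        rw [e1, hsplit]
        by_cases hz : h = 0
        · subst hz; simp
          push_cast
          omega
        · by_cases h4 : 4 ≤ h
          · simp only [hz, h4, if_pos, List.countP_cons, List.countP_nil, if_neg, ite_true, ite_false,
              ne_eq, not_false_iff, true_and]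
            simp [h4, show ¬(h < 4) by omega]
            push_cast
            omega
          · cases hst : scoresB h t
            · simp [hz, h4, hst, show (h < 4) by omega]
              push_cast
              omega
            · simp [hz, h4, hst, show (h < 4) by omega]
              push_cast
              omega
      · -- remaining-bases component
        dsimp only
        rw [if_neg (show (h :: t : List Int) ≠ [] from by simp)]
        rcases eq_or_ne t [] with ht | ht
        · subst ht
          rw [if_pos rfl]
          refine congrArg (fun l => PySem.List.sorted l (fun x => x) false) ?_
          rw [filter_map_add]
          have ep : ∀ p : Int, (!scoresB p [h]) = decide (p + h < 4) := by
            intro p; simp [scoresB, hnot]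
          simp only [ep, List.sum_cons, List.sum_nil, add_zero, NR, List.append_nil]
          by_cases hz : h = 0
          · subst hz; simp
          · by_cases h4 : h < 4 <;> simp [hz, h4, scoresB]
        · rw [if_neg ht]
          refine sorted_id_perm_arg _ _ ?_
          refine List.Perm.trans
            (List.Perm.append_right (NR t)
              (List.Perm.map _ (List.Perm.filter _ (PySem.List.sorted_perm _ _ _)))) ?_
          rw [filter_map_add]
          have ep : ∀ p : Int, (!scoresB p (h :: t)) = (decide (p + h < 4) && !scoresB (p + h) t) := by
            intro p; simp only [scoresB, Bool.not_or, hnot]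
          simp only [List.filter_append, List.filter_map, List.map_append, List.map_map, List.filter_filter,
            ep, NR, List.sum_cons]
          refine List.Perm.of_eq ?_
          rw [List.append_assoc]
          congr 1
          · have e2 : (fun a : Int => ((fun p => !scoresB p t) ∘ fun p => p + h) a && decide (a + h < 4))
                = (fun p : Int => decide (p + h < 4) && !scoresB (p + h) t) := by
              funext a; simp [Function.comp, Bool.and_comm]
            have e3 : ((fun p : Int => p + t.sum) ∘ fun p => p + h) = (fun p : Int => p + (h + t.sum)) := by
              funext p; simp [Function.comp]; ring
            rw [e2, e3]
          · congr 1
            by_cases hz : h = 0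
            · subst hz; simp
            · by_cases h4 : h < 4
              · cases hst : scoresB h t <;> simp [hz, h4, hst, Function.comp, show ¬(4:Int) ≤ h by omega, add_comm]
              · simp [hz, h4, Function.comp, show (4:Int) ≤ h by omega]

lemma Bside : ∀ (seq : List Int),
    seq.reverse.foldl altStep (0, 0, 0, ([] : List Int)) = (seq.sum, mAll seq, NS seq, (NR seq).reverse) := by
  intro seq
  induction seq with
  | nil => rfl
  | cons h t ih =>
      simp only [List.reverse_cons, List.foldl_append, List.foldl_cons, List.foldl_nil, ih, altStep]
      have h0 := scoresB_char t 0 h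
      simp only [scoresB, Bool.or_eq_true, decide_eq_true_iff, zero_add] at h0
      by_cases hz : h = 0
      · subst hz
        simp [NS, NR, mAll, min_comm]
      · by_cases hs : mAll t ≤ t.sum + h - 4
        · by_cases h4 : 4 ≤ h
          · simp [hz, hs, h4, NS, NR, mAll, Prod.mk.injEq, show ¬(h < 4) by omega, min_comm]
            omega
          · have hst : scoresB h t = true := by
              rcases h0.mpr (by omega) with c | c
              · omega
              · exact c
            simp [hz, hs, h4, hst, NS, NR, mAll, Prod.mk.injEq, show h < 4 by omega, min_comm]
            omega
        · have hns := fun c => hs (by omega : mAll t ≤ t.sum + h - 4)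
          have h4 : ¬(4 ≤ h) := fun c => hs (by have := h0.mp (Or.inl c); omega)
          have hst : ¬(scoresB h t = true) := fun c => hs (by have := h0.mp (Or.inr c); omega)
          simp [hz, hs, h4, hst, NS, NR, mAll, Prod.mk.injEq, show h < 4 by omega, min_comm]
          constructor
          · omega
          · rw [show h + t.sum = t.sum + h by omega]
            exact ⟨rfl, rfl⟩

-- ===== VERDICT (by name: the statement is the Claim_ definition above) =====
theorem inning_spec : Claim_equal_inning := by
  intro seq _
  unfold Spec_inning
  show inning seq = inning_alt seq
  unfold inning inning_alt
  rw [Aside seq 0 [], Bside seq]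
  simp only [List.countP_nil, List.filter_nil, List.map_nil, List.nil_append, Nat.cast_zero, add_zero, zero_add]
  rcases seq with _ | ⟨h, t⟩
  · simp [NR, NS, PySem.List.sorted]
  · rw [if_neg (show (h :: t : List Int) ≠ [] from by simp)]
    refine Prod.ext rfl ?_
    exact sorted_id_perm_arg _ _ (List.reverse_perm (NR (h :: t))).symm
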